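-- pv_equiv track=rewrite | github.com/coinmini/flock_validator_local_only_local_path | validator/modules/llm_judge/__init__.py | _format_single_conversation
-- ===== SOURCE A (Python) =====
-- from typing import List, Dict, Any
--
-- def _format_single_conversation(
--     conversation_data: Dict[str, Any]
-- ) -> tuple[str, str]:
--     """Format a single conversation for evaluation, returns (context, assistant_response)"""
--     conversations = conversation_data.get("conversations", [])
--
--     if not conversations:
--         return "No conversation found", ""
--
--     # Format the conversation, separating context from the last assistant response
--     formatted_parts = []
--     assistant_response = ""
--
--     for i, msg in enumerate(conversations):
--         role = msg.get("role", "")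
--         content = msg.get("content", "")
--
--         # Check if this is the last message and it's an assistant/function_call response
--         if i == len(conversations) - 1 and role in ["assistant", "function_call"]:
--             assistant_response = content
--             break
--
--         if role == "system":
--             formatted_parts.append(f"System: {content}")
--         elif role == "user":
--             formatted_parts.append(f"User: {content}")
--         elif role == "assistant":
--             formatted_parts.append(f"Assistant: {content}")
--         elif role == "function_call":
--             formatted_parts.append(f"Function Call: {content}")
--         elif role == "observation":
--             formatted_parts.append(f"Observation: {content}")
--
--     return "\n\n".join(formatted_parts), assistant_response
-- ===== SOURCE B (Python) =====
-- LABELS = {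
--     "system": "System",
--     "user": "User",
--     "assistant": "Assistant",
--     "function_call": "Function Call",
--     "observation": "Observation",
-- }
--
--
-- def _render(msgs):
--     """Recursively render a non-empty message list into (context, assistant_response),
--     concatenating the context string directly instead of collecting parts and joining."""
--     head, tail = msgs[0], msgs[1:]
--     role = head.get("role", "")
--     if not tail:
--         # last message: an assistant/function_call reply becomes the response
--         if role in ("assistant", "function_call"):
--             return "", head.get("content", "")
--         if role in LABELS:
--             return LABELS[role] + ": " + head.get("content", ""), ""
--         return "", ""
--     rest_ctx, resp = _render(tail)
--     if role not in LABELS: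
--         return rest_ctx, resp
--     piece = LABELS[role] + ": " + head.get("content", "")
--     if not rest_ctx:
--         return piece, resp
--     return piece + "\n\n" + rest_ctx, resp
--
--
-- def _format_single_conversation(conversation_data):
--     conversations = conversation_data.get("conversations", [])
--     if not conversations:
--         return "No conversation found", ""
--     return _render(conversations)
-- ===== Notes on version B (the rewrite author's own statement) =====
-- stated objective: alternative
-- what changed: B replaces A's indexed loop with break, parts list and final '\n\n'.join by a structural recursion that renders the tail first and concatenates the context string directly (inserting the separator only when the already-rendered tail context is non-empty), detecting the assistant reply at the recursion's base case instead of by index comparison.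
import Mathlib
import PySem

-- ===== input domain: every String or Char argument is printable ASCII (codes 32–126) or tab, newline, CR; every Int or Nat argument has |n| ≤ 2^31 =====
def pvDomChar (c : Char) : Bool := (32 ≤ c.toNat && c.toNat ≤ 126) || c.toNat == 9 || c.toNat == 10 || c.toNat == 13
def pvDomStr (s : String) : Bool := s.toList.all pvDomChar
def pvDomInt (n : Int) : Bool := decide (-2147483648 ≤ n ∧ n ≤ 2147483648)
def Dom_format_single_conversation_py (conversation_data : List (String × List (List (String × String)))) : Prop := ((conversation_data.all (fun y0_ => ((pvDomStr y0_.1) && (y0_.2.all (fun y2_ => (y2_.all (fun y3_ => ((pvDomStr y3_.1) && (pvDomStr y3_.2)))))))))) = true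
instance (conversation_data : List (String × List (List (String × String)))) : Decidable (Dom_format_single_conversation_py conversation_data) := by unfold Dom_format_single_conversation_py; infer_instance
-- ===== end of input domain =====

-- B renders the conversation by structural recursion from the tail, concatenating the
-- context string directly (separator only before a non-empty tail context) and detecting
-- the assistant reply at the base case, instead of A's indexed loop with break, parts
-- list and final join; objective: alternative.

-- ===== PORT A =====
-- msg.get(k, "") on an association-list dict: first match
def aGetS (m : List (String × String)) (k : String) : String :=
  (List.lookup k m).getD ""

-- A's elif chain appending one labelled part (or nothing) to formatted_parts
def aChain (parts : List String) (role content : String) : List String :=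
  if role = "system" then parts ++ ["System: " ++ content]
  else if role = "user" then parts ++ ["User: " ++ content]
  else if role = "assistant" then parts ++ ["Assistant: " ++ content]
  else if role = "function_call" then parts ++ ["Function Call: " ++ content]
  else if role = "observation" then parts ++ ["Observation: " ++ content]
  else parts

-- the for-loop of A: i is the running index, n = len(conversations); break returns the state
def aLoop (n : Nat) : Nat → List (List (String × String)) → List String → List String × String
  | _, [], parts => (parts, "")
  | i, msg :: rest, parts =>
    let role := aGetS msg "role"
    let content := aGetS msg "content"
    if i = n - 1 ∧ (role = "assistant" ∨ role = "function_call") then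
      (parts, content)
    else
      aLoop n (i + 1) rest (aChain parts role content)

def format_single_conversation_py (conversation_data : List (String × List (List (String × String)))) : String × String :=
  let conversations := (List.lookup "conversations" conversation_data).getD []
  if conversations = [] then ("No conversation found", "")
  else
    let r := aLoop conversations.length 0 conversations []
    (PySem.Str.join "\n\n" r.1, r.2)

-- ===== PORT B =====
-- msg.get(k, "")
def bGetS (m : List (String × String)) (k : String) : String :=
  (List.lookup k m).getD ""

-- LABELS[r] lookup, none ↔ r not in LABELS
def bLabel? (r : String) : Option String :=
  List.lookup r [("system", "System"), ("user", "User"), ("assistant", "Assistant"),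
                 ("function_call", "Function Call"), ("observation", "Observation")]

-- _render: recursion over the messages; Python only calls it on non-empty lists, the []
-- case is unreachable (Python would raise there) and returns ("", "")
def bRender : List (List (String × String)) → String × String
  | [] => ("", "")
  | [m] =>
    let role := bGetS m "role"
    if role = "assistant" ∨ role = "function_call" then ("", bGetS m "content")
    else
      match bLabel? role with
      | some lab => (lab ++ ": " ++ bGetS m "content", "")
      | none => ("", "")
  | m :: t :: ts =>
    let role := bGetS m "role"
    let r := bRender (t :: ts)
    match bLabel? role with
    | none => r
    | some lab =>
      let piece := lab ++ ": " ++ bGetS m "content"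
      if r.1 = "" then (piece, r.2) else (piece ++ "\n\n" ++ r.1, r.2)

def format_single_conversation_py_alt (conversation_data : List (String × List (List (String × String)))) : String × String :=
  let conversations := (List.lookup "conversations" conversation_data).getD []
  if conversations = [] then ("No conversation found", "")
  else bRender conversations

-- ===== PRECONDITION & SPEC =====
def Spec_format_single_conversation_py (conversation_data : List (String × List (List (String × String)))) (out : String × String) : Prop := out = format_single_conversation_py_alt conversation_data
instance (conversation_data : List (String × List (List (String × String)))) (out : String × String) : Decidable (Spec_format_single_conversation_py conversation_data out) := by unfold Spec_format_single_conversation_py; infer_instance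

-- ===== CLAIM (what is proved, stated in full; the proofs are below) =====
def Claim_equal_format_single_conversation_py : Prop := ∀ (conversation_data : List (String × List (List (String × String)))), Dom_format_single_conversation_py conversation_data → Spec_format_single_conversation_py conversation_data (format_single_conversation_py conversation_data)

-- ===== LEMMAS AND PROOFS =====

-- proof-side abstraction of the labelled parts of a message list
def partsFn (msgs : List (List (String × String))) : List String :=
  msgs.filterMap (fun m =>
    (bLabel? ((List.lookup "role" m).getD "")).map
      (fun lab => lab ++ ": " ++ ((List.lookup "content" m).getD "")))

lemma bLabel?_eq (r : String) : bLabel? r =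
    (if r = "system" then some "System" else if r = "user" then some "User"
     else if r = "assistant" then some "Assistant" else if r = "function_call" then some "Function Call"
     else if r = "observation" then some "Observation" else none) := by
  unfold bLabel?
  simp only [List.lookup]
  by_cases h1 : r = "system" <;> by_cases h2 : r = "user" <;> by_cases h3 : r = "assistant" <;>
    by_cases h4 : r = "function_call" <;> by_cases h5 : r = "observation" <;>
      simp_all [beq_eq_decide]

lemma partsFn_singleton (m : List (String × String)) :
    partsFn [m] = ((bLabel? ((List.lookup "role" m).getD "")).map
      (fun lab => lab ++ ": " ++ ((List.lookup "content" m).getD ""))).toList := by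
  simp [partsFn, List.filterMap_cons]
  cases (bLabel? ((List.lookup "role" m).getD "")).map
      (fun lab => lab ++ ": " ++ ((List.lookup "content" m).getD "")) <;> simp

lemma aChain_eq_partsFn (parts : List String) (m : List (String × String)) :
    aChain parts (aGetS m "role") (aGetS m "content") = parts ++ partsFn [m] := by
  rw [partsFn_singleton]
  unfold aChain aGetS
  rw [bLabel?_eq]
  split_ifs <;> simp

lemma partsFn_cons (m : List (String × String)) (l : List (List (String × String))) :
    partsFn (m :: l) = partsFn [m] ++ partsFn l := by
  simp only [partsFn, List.filterMap_cons, List.filterMap_nil]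
  cases (bLabel? ((List.lookup "role" m).getD "")).map
      (fun lab => lab ++ ": " ++ ((List.lookup "content" m).getD "")) <;> simp

lemma aLoop_cons (n i : Nat) (msg : List (String × String)) (rest : List (List (String × String)))
    (parts : List String) :
    aLoop n i (msg :: rest) parts =
      (if i = n - 1 ∧ (aGetS msg "role" = "assistant" ∨ aGetS msg "role" = "function_call") then
        (parts, aGetS msg "content")
      else aLoop n (i + 1) rest (aChain parts (aGetS msg "role") (aGetS msg "content"))) := rfl

lemma aLoop_eq (msgs : List (List (String × String))) (n i : Nat) (parts : List String)
    (hn : i + msgs.length = n) (hne : msgs ≠ []) :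
    aLoop n i msgs parts =
      (if (List.lookup "role" (msgs.getLast hne)).getD "" = "assistant" ∨
          (List.lookup "role" (msgs.getLast hne)).getD "" = "function_call" then
        (parts ++ partsFn msgs.dropLast, (List.lookup "content" (msgs.getLast hne)).getD "")
      else (parts ++ partsFn msgs, "")) := by
  induction msgs generalizing i parts with
  | nil => exact absurd rfl hne
  | cons m rest ih =>
    cases rest with
    | nil =>
      have hi : i = n - 1 := by simp at hn; omega
      rw [aLoop_cons]
      simp only [List.getLast_singleton, List.dropLast_singleton]
      by_cases hr : (List.lookup "role" m).getD "" = "assistant" ∨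
          (List.lookup "role" m).getD "" = "function_call"
      · rw [if_pos ⟨hi, by simpa [aGetS] using hr⟩, if_pos hr]
        simp [aGetS, partsFn]
      · rw [if_neg (by simp [aGetS]; tauto), if_neg hr, aChain_eq_partsFn]
        simp [aLoop]
    | cons m2 rest2 =>
      have hi : ¬ i = n - 1 := by simp at hn; omega
      rw [aLoop_cons, if_neg (by tauto), aChain_eq_partsFn,
        ih (i + 1) (parts ++ partsFn [m]) (by simp at hn ⊢; omega) (by simp)]
      have hlast : (m :: m2 :: rest2).getLast hne = (m2 :: rest2).getLast (by simp) := by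
        simp [List.getLast]
      have hdrop : (m :: m2 :: rest2).dropLast = m :: (m2 :: rest2).dropLast := by
        simp
      rw [hlast, hdrop, partsFn_cons m ((m2 :: rest2).dropLast), partsFn_cons m (m2 :: rest2)]
      split_ifs <;> simp

-- a labelled part is never the empty string (it contains ": ")
lemma part_ne_empty (lab c : String) : lab ++ ": " ++ c ≠ "" := by
  intro h
  have := congrArg String.toList h
  simp at this

lemma mem_partsFn_ne_empty (l : List (List (String × String))) :
    ∀ p ∈ partsFn l, p ≠ "" := by
  intro p hp
  simp only [partsFn, List.mem_filterMap, Option.map_eq_some_iff] at hp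
  obtain ⟨m, _, lab, _, hlab⟩ := hp
  exact hlab ▸ part_ne_empty lab _

lemma join_ne_empty (L : List String) (hne : L ≠ []) (h : ∀ p ∈ L, p ≠ "") :
    PySem.Str.join "\n\n" L ≠ "" := by
  match L with
  | [p] => simpa [PySem.Str.join] using h p (by simp)
  | p :: q :: rest =>
    intro hc
    have := congrArg String.toList hc
    rw [PySem.Str.toList_join] at this
    simp only [List.map_cons] at this
    rw [PySem.Chars.join_cons_cons] at this
    simp at this

-- join of a cons in terms of the (direct-concatenation) join of the tail
lemma join_cons_char (p : String) (L : List String) (h : ∀ q ∈ L, q ≠ "") :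
    PySem.Str.join "\n\n" (p :: L) =
      (if PySem.Str.join "\n\n" L = "" then p else p ++ "\n\n" ++ PySem.Str.join "\n\n" L) := by
  match L with
  | [] => simp [PySem.Str.join]
  | q :: rest =>
    rw [if_neg (join_ne_empty (q :: rest) (by simp) h)]
    apply String.toList_inj.mp
    rw [PySem.Str.toList_join]
    simp only [List.map_cons]
    rw [PySem.Chars.join_cons_cons]
    simp [PySem.Str.toList_join]

lemma str_join_singleton (p : String) : PySem.Str.join "\n\n" [p] = p := by
  apply String.toList_inj.mp
  rw [PySem.Str.toList_join]
  simp [PySem.Chars.join_singleton]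

-- B's recursion computes join of the labelled parts, with the split at the last message
lemma bRender_eq (msgs : List (List (String × String))) (hne : msgs ≠ []) :
    bRender msgs =
      (if (List.lookup "role" (msgs.getLast hne)).getD "" = "assistant" ∨
          (List.lookup "role" (msgs.getLast hne)).getD "" = "function_call" then
        (PySem.Str.join "\n\n" (partsFn msgs.dropLast),
         (List.lookup "content" (msgs.getLast hne)).getD "")
      else (PySem.Str.join "\n\n" (partsFn msgs), "")) := by
  induction msgs with
  | nil => exact absurd rfl hne
  | cons m rest ih =>
    cases rest with
    | nil =>
      simp only [List.getLast_singleton, List.dropLast_singleton]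
      by_cases hr : (List.lookup "role" m).getD "" = "assistant" ∨
          (List.lookup "role" m).getD "" = "function_call"
      · rw [if_pos hr]
        unfold bRender
        rw [if_pos (by simpa [bGetS] using hr)]
        simp [partsFn, PySem.Str.join, bGetS]
      · rw [if_neg hr]
        unfold bRender
        rw [if_neg (by simp [bGetS]; tauto), partsFn_singleton]
        cases hl : bLabel? ((List.lookup "role" m).getD "") with
        | none => simp [bGetS, hl, PySem.Str.join]
        | some lab => simp [bGetS, hl, str_join_singleton]
    | cons m2 rest2 =>
      have hlast : (m :: m2 :: rest2).getLast hne = (m2 :: rest2).getLast (by simp) := by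
        simp [List.getLast]
      have hdrop : (m :: m2 :: rest2).dropLast = m :: (m2 :: rest2).dropLast := by simp
      have ih' := ih (by simp)
      show (let role := bGetS m "role";
            let r := bRender (m2 :: rest2);
            match bLabel? role with
            | none => r
            | some lab =>
              let piece := lab ++ ": " ++ bGetS m "content"
              if r.1 = "" then (piece, r.2) else (piece ++ "\n\n" ++ r.1, r.2)) = _
      rw [hlast, hdrop, partsFn_cons m ((m2 :: rest2).dropLast), partsFn_cons m (m2 :: rest2)]
      simp only [bGetS, ih']
      cases hl : bLabel? ((List.lookup "role" m).getD "") with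
      | none =>
        rw [partsFn_singleton, hl]
        split_ifs <;> simp
      | some lab =>
        rw [partsFn_singleton, hl]
        simp only [Option.map_some, Option.toList_some, List.singleton_append]
        by_cases hr : (List.lookup "role" ((m2 :: rest2).getLast (by simp))).getD "" = "assistant" ∨
            (List.lookup "role" ((m2 :: rest2).getLast (by simp))).getD "" = "function_call"
        · rw [if_pos hr, if_pos hr]
          rw [join_cons_char _ _ (mem_partsFn_ne_empty _)]
          split_ifs <;> rfl
        · rw [if_neg hr, if_neg hr]
          rw [join_cons_char _ _ (mem_partsFn_ne_empty _)]
          split_ifs <;> rfl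

-- ===== VERDICT (by name: the statement is the Claim_ definition above) =====
theorem format_single_conversation_py_spec : Claim_equal_format_single_conversation_py := by
  intro cd _
  unfold Spec_format_single_conversation_py
  unfold format_single_conversation_py format_single_conversation_py_alt
  cases h : (List.lookup "conversations" cd).getD [] with
  | nil => simp
  | cons m ms =>
    simp only
    rw [if_neg (by simp), if_neg (by simp)]
    rw [aLoop_eq (m :: ms) (m :: ms).length 0 [] (by simp) (by simp),
      bRender_eq (m :: ms) (by simp)]
    split_ifs <;> simp
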